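-- pv_equiv track=rewrite | github.com/abwo/abping | abping.py | _get_payload_hex_sum_value_for_cksum
-- ===== SOURCE A (Python) =====
-- def _get_payload_hex_sum_value_for_cksum(payload):
--     payload_hex = payload.encode().hex()
--     if (len(payload_hex)/2) % 2 != 0:
--         payload_hex = payload_hex + '00'
--     sum = 0
--     for i in range(0, len(payload_hex), 4):
--         sum = sum + int(payload_hex[i:i+4], 16)
--     return sum
-- ===== SOURCE B (Python) =====
-- def _get_payload_hex_sum_value_for_cksum(payload):
--     b = payload.encode()
--     if len(b) % 2:
--         b += b'\x00'
--     return 256 * sum(b[0::2]) + sum(b[1::2])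
-- ===== Notes on version B (the rewrite author's own statement) =====
-- stated objective: simpler
-- what changed: B drops the hex-string round-trip and the 4-char chunk-parsing loop: it pads the raw byte string to even length and returns 256*sum(even-index bytes) + sum(odd-index bytes) via two strided slices.
import Mathlib
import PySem

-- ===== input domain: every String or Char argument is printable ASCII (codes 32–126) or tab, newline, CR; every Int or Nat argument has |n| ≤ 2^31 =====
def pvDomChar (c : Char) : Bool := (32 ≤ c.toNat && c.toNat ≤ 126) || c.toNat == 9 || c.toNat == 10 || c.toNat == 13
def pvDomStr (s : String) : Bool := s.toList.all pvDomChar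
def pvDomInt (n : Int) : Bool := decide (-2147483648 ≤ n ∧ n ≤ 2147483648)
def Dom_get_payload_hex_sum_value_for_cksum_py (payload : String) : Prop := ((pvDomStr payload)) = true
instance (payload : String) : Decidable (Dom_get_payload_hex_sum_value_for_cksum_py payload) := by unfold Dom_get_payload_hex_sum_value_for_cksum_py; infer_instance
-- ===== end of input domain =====

-- B drops A's encode().hex() round-trip and 4-hex-char chunk-parsing loop: it pads the raw
-- bytes to even length and returns 256*sum(even-index bytes) + sum(odd-index bytes); simpler, and measurably faster in Python.


-- ===== PORT A =====
-- one lowercase hex digit (the alphabet bytes.hex() uses)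
def pvHexDigit (n : Nat) : Char := "0123456789abcdef".toList.getD n '0'

-- payload.encode().hex(): UTF-8 encode then two lowercase hex digits per byte.
-- Exact on Dom (printable ASCII + tab/newline/CR): there each char is one byte equal to its code point.
def pvHexOfBytes (bs : List Nat) : List Char :=
  bs.flatMap (fun v => [pvHexDigit (v / 16), pvHexDigit (v % 16)])

def get_payload_hex_sum_value_for_cksum_py (payload : String) : Int :=
  let payload_hex0 : List Char := pvHexOfBytes (payload.toList.map Char.toNat)
  -- (len(payload_hex)/2) % 2 != 0  — len is even, so Python's float division is exact here
  let payload_hex : List Char :=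
    if (payload_hex0.length / 2) % 2 ≠ 0 then payload_hex0 ++ ['0', '0'] else payload_hex0
  (PySem.List.pyRange 0 (payload_hex.length : Int) 4).foldl
    (fun sum i =>
      -- int(payload_hex[i:i+4], 16); every chunk is valid hex so int() never raises (default unreachable)
      sum + (PySem.Int.ofCharsBase? (PySem.List.slice payload_hex (some i) (some (i + 4))) 16).getD 0)
    0

-- ===== PORT B =====
def get_payload_hex_sum_value_for_cksum_py_alt (payload : String) : Int :=
  -- payload.encode(): exact on Dom (ASCII), one byte per char
  let b0 : List Int := payload.toList.map (fun c => (c.toNat : Int))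
  let b : List Int := if b0.length % 2 ≠ 0 then b0 ++ [0] else b0
  256 * ((PySem.List.slice? b (some 0) none 2).getD []).sum
    + ((PySem.List.slice? b (some 1) none 2).getD []).sum

-- ===== PRECONDITION & SPEC =====
def Spec_get_payload_hex_sum_value_for_cksum_py (payload : String) (out : Int) : Prop := out = get_payload_hex_sum_value_for_cksum_py_alt payload
instance (payload : String) (out : Int) : Decidable (Spec_get_payload_hex_sum_value_for_cksum_py payload out) := by unfold Spec_get_payload_hex_sum_value_for_cksum_py; infer_instance

-- ===== CLAIM (what is proved, stated in full; the proofs are below) =====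
def Claim_equal_get_payload_hex_sum_value_for_cksum_py : Prop := ∀ (payload : String), Dom_get_payload_hex_sum_value_for_cksum_py payload → Spec_get_payload_hex_sum_value_for_cksum_py payload (get_payload_hex_sum_value_for_cksum_py payload)

-- ===== LEMMAS AND PROOFS =====

-- every other element, starting with the head (what b[0::2] selects)
def pvStride2 {α : Type} : List α → List α
  | [] => []
  | [a] => [a]
  | a :: _ :: r => a :: pvStride2 r

-- sum of the 16-bit big-endian words of an even-length byte list
def pvWordSum : List Nat → Int
  | a :: b :: r => ((a * 256 + b : Nat) : Int) + pvWordSum r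
  | _ => 0

-- int(h1h2h3h4, 16) of the hex expansion of two bytes < 128
set_option maxHeartbeats 8000000 in
set_option maxRecDepth 100000 in
theorem pvParse4 : ∀ a b : Fin 128,
    PySem.Int.ofCharsBase?
      [pvHexDigit ((a : Nat) / 16), pvHexDigit ((a : Nat) % 16),
       pvHexDigit ((b : Nat) / 16), pvHexDigit ((b : Nat) % 16)] 16
      = some (((a : Nat) : Int) * 256 + ((b : Nat) : Int)) := by decide

theorem pvHexLen (bs : List Nat) : (pvHexOfBytes bs).length = 2 * bs.length := by
  induction bs with
  | nil => simp [pvHexOfBytes]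
  | cons a r ih => simp [pvHexOfBytes] at ih ⊢; omega

-- A's chunk loop, re-indexed over Nat (k-th chunk starts at 4*k)
theorem pvLoopA' : ∀ bs : List Nat, (∀ x ∈ bs, x < 128) → bs.length % 2 = 0 → ∀ acc : Int,
    (List.range (bs.length / 2)).foldl
      (fun s k =>
        s + (PySem.Int.ofCharsBase?
              (PySem.List.slice (pvHexOfBytes bs) (some ((4*k : Nat) : Int)) (some ((4*k+4 : Nat) : Int))) 16).getD 0)
      acc = acc + pvWordSum bs
  | [], _, _, acc => by simp [pvWordSum]
  | [a], _, h2, acc => by simp at h2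
  | a :: b :: r, h1, h2, acc => by
    have hlen : (a :: b :: r).length / 2 = r.length / 2 + 1 := by simp; omega
    rw [hlen, List.range_succ_eq_map, List.foldl_cons, List.foldl_map]
    have hhex : pvHexOfBytes (a :: b :: r)
        = pvHexDigit (a / 16) :: pvHexDigit (a % 16) :: pvHexDigit (b / 16) :: pvHexDigit (b % 16)
          :: pvHexOfBytes r := by
      simp [pvHexOfBytes]
    have hfirst : PySem.List.slice (pvHexOfBytes (a :: b :: r)) (some ((4*0 : Nat) : Int)) (some ((4*0+4 : Nat) : Int))
        = [pvHexDigit (a / 16), pvHexDigit (a % 16), pvHexDigit (b / 16), pvHexDigit (b % 16)] := by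
      rw [PySem.List.slice_natCast, hhex]
      rfl
    have ha : a < 128 := h1 a (by simp)
    have hb : b < 128 := h1 b (by simp)
    have hv := pvParse4 ⟨a, ha⟩ ⟨b, hb⟩
    simp only [hfirst, hv, Option.getD_some]
    have hshift : ∀ k : Nat,
        PySem.List.slice (pvHexOfBytes (a :: b :: r)) (some ((4*(k+1) : Nat) : Int)) (some ((4*(k+1)+4 : Nat) : Int))
          = PySem.List.slice (pvHexOfBytes r) (some ((4*k : Nat) : Int)) (some ((4*k+4 : Nat) : Int)) := by
      intro k
      rw [PySem.List.slice_natCast, PySem.List.slice_natCast, hhex]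
      have h4 : 4*(k+1) = (4*k + 4) := by omega
      simp [h4, List.drop_succ_cons]
    simp only [hshift]
    have ih := pvLoopA' r (fun x hx => h1 x (by simp [hx])) (by simp at h2 ⊢; omega)
      (acc + (((a:Nat) : Int) * 256 + ((b:Nat) : Int)))
    rw [ih, pvWordSum]
    push_cast
    ring

-- A's loop as written (Int pyRange with step 4) equals the Nat-indexed loop's value
theorem pvLoopA (bs : List Nat) (h1 : ∀ x ∈ bs, x < 128) (h2 : bs.length % 2 = 0) (acc : Int) :
    (PySem.List.pyRange 0 ((pvHexOfBytes bs).length : Int) 4).foldl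
      (fun sum i =>
        sum + (PySem.Int.ofCharsBase? (PySem.List.slice (pvHexOfBytes bs) (some i) (some (i + 4))) 16).getD 0)
      acc = acc + pvWordSum bs := by
  rw [PySem.List.pyRange_of_pos 0 ((pvHexOfBytes bs).length : Int) (by norm_num), List.foldl_map]
  have hcnt : (if (0:Int) < ((pvHexOfBytes bs).length : Int)
      then ((((pvHexOfBytes bs).length : Int) - 0 + 4 - 1) / 4).toNat else 0) = bs.length / 2 := by
    rw [pvHexLen]
    split_ifs with h
    · omega
    · omega
  rw [hcnt]
  have hfun : ∀ (s : Int) (k : Nat),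
      s + (PySem.Int.ofCharsBase? (PySem.List.slice (pvHexOfBytes bs) (some (0 + 4*(k:Int))) (some (0 + 4*(k:Int) + 4))) 16).getD 0
      = s + (PySem.Int.ofCharsBase?
              (PySem.List.slice (pvHexOfBytes bs) (some ((4*k : Nat) : Int)) (some ((4*k+4 : Nat) : Int))) 16).getD 0 := by
    intro s k
    have e1 : (0 + 4*(k:Int)) = ((4*k : Nat) : Int) := by push_cast; ring
    have e2 : ((4*k : Nat) : Int) + 4 = ((4*k+4 : Nat) : Int) := by push_cast; ring
    rw [e1, e2]
  simp only [hfun]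
  exact pvLoopA' bs h1 h2 acc

theorem pvCore {α : Type} : ∀ xs : List α,
    List.filterMap (fun k => xs[2*k]?) (List.range ((xs.length+1)/2)) = pvStride2 xs
  | [] => by simp [pvStride2]
  | [a] => by simp [pvStride2]
  | a :: b :: r => by
    have h : (a::b::r).length = r.length + 2 := by simp
    rw [h]
    have h2 : (r.length + 2 + 1)/2 = (r.length+1)/2 + 1 := by omega
    rw [h2, List.range_succ_eq_map]
    simp only [List.filterMap_cons, List.filterMap_map, Function.comp_def]
    have h4 : ∀ k, (a::b::r)[2*(k+1)]? = r[2*k]? := by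
      intro k
      have : 2*(k+1) = 2*k + 1 + 1 := by omega
      simp [this]
    simp only [h4, pvCore r]
    simp [pvStride2]

theorem pvSliceEven {α : Type} (xs : List α) :
    (PySem.List.slice? xs (some 0) none 2).getD [] = pvStride2 xs := by
  simp only [PySem.List.slice?, PySem.List.sliceIndices]
  norm_num
  have hc : (if 0 < xs.length then (((xs.length : Int) + 2 - 1) / 2).toNat else 0) = (xs.length+1)/2 := by
    split_ifs with h
    · omega
    · omega
  have hi : ∀ x : Nat, ((2 * (x:Int)).toNat) = 2*x := by intro x; omega
  simp only [hc, hi]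
  exact pvCore xs

theorem pvSliceOdd {α : Type} (xs : List α) :
    (PySem.List.slice? xs (some 1) none 2).getD [] = pvStride2 xs.tail := by
  simp only [PySem.List.slice?, PySem.List.sliceIndices]
  norm_num
  cases xs with
  | nil => simp [pvStride2]
  | cons a r =>
    have hm : min (1:Int) (((a::r).length:Nat):Int) = 1 := by
      simp only [List.length_cons]
      omega
    rw [hm]
    have hc : (if 1 < (a::r).length then ((((a::r).length : Int) - 1 + 2 - 1) / 2).toNat else 0) = (r.length+1)/2 := by
      simp only [List.length_cons]
      split_ifs with h
      · omega
      · omega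
    have hi : ∀ x : Nat, (a::r)[(1 + 2 * (x:Int)).toNat]? = r[2*x]? := by
      intro x
      have : ((1 + 2 * (x:Int)).toNat) = 2*x + 1 := by omega
      simp [this]
    rw [hc]
    simp only [hi]
    exact pvCore r

theorem pvStride2ConsSum (y : Int) (r : List Int) :
    (pvStride2 (y :: r)).sum = y + (pvStride2 r.tail).sum := by
  cases r with
  | nil => simp [pvStride2]
  | cons z rest => simp [pvStride2]

-- the word sum splits into the two strided byte sums
theorem pvBridge : ∀ bs : List Nat, bs.length % 2 = 0 →
    pvWordSum bs =
      256 * (pvStride2 (bs.map Int.ofNat)).sum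
        + (pvStride2 (bs.map Int.ofNat).tail).sum
  | [], _ => by simp [pvWordSum, pvStride2]
  | [a], h => by simp at h
  | a :: b :: r, h => by
    have ih := pvBridge r (by simp at h ⊢; omega)
    simp only [List.map_cons, pvStride2, List.tail_cons, List.sum_cons, pvWordSum]
    rw [pvStride2ConsSum (Int.ofNat b) (r.map Int.ofNat)]
    rw [ih]
    simp only [Int.ofNat_eq_natCast]
    push_cast
    ring

-- hex padding '00' is the hex expansion of one zero byte
theorem pvHexPad (bs : List Nat) : pvHexOfBytes bs ++ ['0', '0'] = pvHexOfBytes (bs ++ [0]) := by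
  simp [pvHexOfBytes]
  rfl

-- common core: for any even-or-padded byte list
theorem pvMain (bs : List Nat) (h1 : ∀ x ∈ bs, x < 128) (h2 : bs.length % 2 = 0) :
    (PySem.List.pyRange 0 ((pvHexOfBytes bs).length : Int) 4).foldl
      (fun sum i =>
        sum + (PySem.Int.ofCharsBase? (PySem.List.slice (pvHexOfBytes bs) (some i) (some (i + 4))) 16).getD 0)
      0
    = 256 * ((PySem.List.slice? (bs.map Int.ofNat) (some 0) none 2).getD []).sum
        + ((PySem.List.slice? (bs.map Int.ofNat) (some 1) none 2).getD []).sum := by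
  rw [pvLoopA bs h1 h2 0, pvSliceEven, pvSliceOdd, zero_add]
  exact pvBridge bs h2

-- ===== VERDICT (by name: the statement is the Claim_ definition above) =====
theorem get_payload_hex_sum_value_for_cksum_py_spec : Claim_equal_get_payload_hex_sum_value_for_cksum_py := by
  intro payload hdom
  unfold Spec_get_payload_hex_sum_value_for_cksum_py
  unfold get_payload_hex_sum_value_for_cksum_py get_payload_hex_sum_value_for_cksum_py_alt
  simp only []
  set bs : List Nat := payload.toList.map Char.toNat with hbs
  have hb0 : payload.toList.map (fun c => ((c.toNat : Nat) : Int)) = bs.map Int.ofNat := by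
    simp [hbs, List.map_map, Function.comp_def]
  have h1 : ∀ x ∈ bs, x < 128 := by
    intro x hx
    rw [hbs] at hx
    obtain ⟨c, hc, rfl⟩ := List.mem_map.mp hx
    have := List.all_eq_true.mp hdom c hc
    simp [pvDomChar] at this
    omega
  have hlen : (pvHexOfBytes bs).length = 2 * bs.length := pvHexLen bs
  have hlenB : (payload.toList.map (fun c => (c.toNat : Int))).length = bs.length := by
    simp [hbs]
  by_cases hpar : bs.length % 2 = 0
  · have hA : ((pvHexOfBytes bs).length / 2) % 2 ≠ 0 ↔ False := by
      rw [hlen]; constructor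
      · intro hcon; apply hcon; omega
      · intro hcon; exact hcon.elim
    rw [if_neg (by rw [hlen]; omega), if_neg (by rw [hlenB]; omega), hb0]
    exact pvMain bs h1 hpar
  · rw [if_pos (by rw [hlen]; omega), if_pos (by rw [hlenB]; omega), hb0]
    rw [pvHexPad bs]
    have h1' : ∀ x ∈ bs ++ [0], x < 128 := by
      intro x hx
      rcases List.mem_append.mp hx with h | h
      · exact h1 x h
      · simp at h; omega
    have h2' : (bs ++ [0]).length % 2 = 0 := by simp; omega
    have hmap : (bs ++ [0]).map Int.ofNat = bs.map Int.ofNat ++ [(0:Int)] := by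
      simp
    rw [← hmap]
    exact pvMain (bs ++ [0]) h1' h2'
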